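-- pv_equiv track=rewrite | github.com/Atharva080324/TrueScan | utils.py | extract_headlines
-- ===== SOURCE A (Python) =====
-- def extract_headlines(cleaned_text: str) -> str:
--     lines = [line.strip() for line in cleaned_text.split('\n') if line.strip()]
--     headlines = []
--     current_block = []
--
--     for line in lines:
--         if current_block:
--             headlines.append(current_block[0])
--             current_block = []
--         else:
--             current_block.append(line)
--     if current_block:
--         headlines.append(current_block[0])
--     return "\n".join(headlines)
-- ===== SOURCE B (Python) =====
-- def extract_headlines(cleaned_text: str) -> str:
--     lines = [line.strip() for line in cleaned_text.split('\n') if line.strip()]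
--     return "\n".join(lines[::2])
-- ===== Notes on version B (the rewrite author's own statement) =====
-- stated objective: simpler
-- what changed: Replaces the one-element buffer/flush state machine over the lines with a direct even-index stride selection lines[::2] joined in one expression.
import Mathlib
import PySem

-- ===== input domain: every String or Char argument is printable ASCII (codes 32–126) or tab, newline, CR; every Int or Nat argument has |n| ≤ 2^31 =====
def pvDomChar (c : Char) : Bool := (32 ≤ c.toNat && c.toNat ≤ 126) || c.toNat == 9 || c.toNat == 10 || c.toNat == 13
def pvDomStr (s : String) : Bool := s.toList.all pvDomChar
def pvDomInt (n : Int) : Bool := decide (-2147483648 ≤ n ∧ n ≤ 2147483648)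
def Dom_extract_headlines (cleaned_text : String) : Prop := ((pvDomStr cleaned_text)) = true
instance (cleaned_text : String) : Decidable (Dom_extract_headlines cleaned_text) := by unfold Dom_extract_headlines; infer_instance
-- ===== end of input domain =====

-- B replaces A's one-element buffer/flush state machine with a direct even-index
-- stride selection lines[::2]; objective: simpler.

-- ===== PORT A =====
-- A's loop body: if current_block: headlines.append(current_block[0]); current_block = []
--                else: current_block.append(line)
def pvStepA (st : List String × List String) (line : String) : List String × List String :=
  if st.2 ≠ [] then (st.1 ++ [st.2.headD ""], []) else (st.1, st.2 ++ [line])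

-- the trailing 'if current_block: headlines.append(current_block[0])'
def pvFlush (st : List String × List String) : List String :=
  if st.2 ≠ [] then st.1 ++ [st.2.headD ""] else st.1

def extract_headlines (cleaned_text : String) : String :=
  let lines := (((PySem.Str.split? cleaned_text "\n").getD []).filter
      (fun line => PySem.Str.strip line ≠ "")).map PySem.Str.strip
  let st := lines.foldl pvStepA ([], [])
  PySem.Str.join "\n" (pvFlush st)

-- ===== PORT B =====
def extract_headlines_alt (cleaned_text : String) : String :=
  let lines := (((PySem.Str.split? cleaned_text "\n").getD []).filter
      (fun line => PySem.Str.strip line ≠ "")).map PySem.Str.strip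
  PySem.Str.join "\n" ((PySem.List.slice? lines none none 2).getD [])

-- ===== PRECONDITION & SPEC =====
def Spec_extract_headlines (cleaned_text : String) (out : String) : Prop := out = extract_headlines_alt cleaned_text
instance (cleaned_text : String) (out : String) : Decidable (Spec_extract_headlines cleaned_text out) := by unfold Spec_extract_headlines; infer_instance

-- ===== CLAIM (what is proved, stated in full; the proofs are below) =====
def Claim_equal_extract_headlines : Prop := ∀ (cleaned_text : String), Dom_extract_headlines cleaned_text → Spec_extract_headlines cleaned_text (extract_headlines cleaned_text)

-- ===== LEMMAS AND PROOFS =====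

-- every even-indexed element (the common value both ports compute)
def pvEveryOther {α : Type} : List α → List α
  | [] => []
  | [x] => [x]
  | x :: _ :: r => x :: pvEveryOther r

-- A's loop with an empty buffer, then the final flush, yields the even-indexed lines.
theorem pvLoopA_eq : ∀ (lines : List String) (h : List String),
    pvFlush (lines.foldl pvStepA (h, [])) = h ++ pvEveryOther lines
  | [], h => by simp [pvEveryOther, pvFlush]
  | [x], h => by simp [pvStepA, pvEveryOther, pvFlush]
  | x :: y :: r, h => by
    have ih := pvLoopA_eq r (h ++ [x])
    have e1 : pvStepA (h, []) x = (h, [x]) := by simp [pvStepA]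
    have e2 : pvStepA (h, [x]) y = (h ++ [x], []) := by simp [pvStepA]
    rw [List.foldl_cons, List.foldl_cons, e1, e2, ih]
    simp [pvEveryOther]

-- lines[::2] is the even-indexed elements.
theorem pvRangeEveryOther {α : Type} : ∀ (xs : List α),
    (List.range ((xs.length + 1) / 2)).filterMap (fun k => xs[2 * k]?) = pvEveryOther xs
  | [] => by simp [pvEveryOther]
  | [x] => by simp [pvEveryOther, List.range_succ]
  | x :: y :: r => by
    have ih := pvRangeEveryOther r
    have hlen : (((x :: y :: r).length + 1) / 2) = (r.length + 1) / 2 + 1 := by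
      simp [List.length, Nat.add_comm]; omega
    rw [hlen, List.range_succ_eq_map, List.filterMap_cons, List.filterMap_map]
    simp only [Nat.mul_zero, List.getElem?_cons_zero, Function.comp]
    have : (fun k => (x :: y :: r)[2 * (k + 1)]?) = fun k => r[2 * k]? := by
      funext k
      have : 2 * (k + 1) = 2 * k + 1 + 1 := by omega
      simp [this]
    rw [this, ih]
    simp [pvEveryOther]

theorem pvSlice2 {α : Type} (xs : List α) :
    PySem.List.slice? xs none none 2 = some (pvEveryOther xs) := by
  simp only [PySem.List.slice?, PySem.List.sliceIndices]
  norm_num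
  rw [← pvRangeEveryOther xs]
  have hc : (if 0 < xs.length then (((xs.length:Int) + 2 - 1) / 2).toNat else 0)
      = (xs.length + 1) / 2 := by
    split_ifs with h <;> omega
  have hf : (fun k : Nat => xs[((2:Int) * (k:Int)).toNat]?) = fun k : Nat => xs[2 * k]? := by
    funext k
    have : (((2:Int) * (k:Int)).toNat) = 2 * k := by omega
    rw [this]
  rw [hc, hf]

-- ===== VERDICT (by name: the statement is the Claim_ definition above) =====
theorem extract_headlines_spec : Claim_equal_extract_headlines := by
  intro s _
  unfold Spec_extract_headlines extract_headlines extract_headlines_alt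
  simp only [pvSlice2, Option.getD_some]
  rw [pvLoopA_eq _ []]
  simp
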